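-- pv_equiv track=rewrite | github.com/alibaba/EasyNLP | examples/SpanProto/tool/ner.py | bio_2_position
-- ===== SOURCE A (Python) =====
-- def bio_2_position(bio):
--     positions = []
--     start = None
--     for i, l in enumerate(bio):
--         if l == 0:
--             if start is not None:
--                 positions.append([start, i])
--                 start = None
--         elif l == 1:
--             if start is not None:
--                 positions.append([start, i])
--             start = i
--
--     return positions
-- ===== SOURCE B (Python) =====
-- def bio_2_position(bio):
--     bs = [(i, l) for i, l in enumerate(bio) if l == 0 or l == 1]
--     return [[i, j] for (i, l), (j, _) in zip(bs, bs[1:]) if l == 1]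
-- ===== Notes on version B (the rewrite author's own statement) =====
-- stated objective: alternative
-- what changed: Replaces A's one-pass mutable-start state machine with an explicit boundary-event index (all positions labelled 0 or 1) paired with its successor: a span is exactly a 1-event together with the next event, so trailing open spans drop out for free.
import Mathlib
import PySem

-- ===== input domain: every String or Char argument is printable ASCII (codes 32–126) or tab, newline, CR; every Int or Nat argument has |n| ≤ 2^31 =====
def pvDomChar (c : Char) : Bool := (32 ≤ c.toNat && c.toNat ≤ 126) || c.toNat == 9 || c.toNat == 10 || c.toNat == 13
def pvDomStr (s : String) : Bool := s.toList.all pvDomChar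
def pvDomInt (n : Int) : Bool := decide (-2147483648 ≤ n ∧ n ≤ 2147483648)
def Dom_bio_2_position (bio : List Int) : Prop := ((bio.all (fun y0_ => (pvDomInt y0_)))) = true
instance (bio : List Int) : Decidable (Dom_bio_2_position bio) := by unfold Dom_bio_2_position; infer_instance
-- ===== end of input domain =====

-- B replaces A's mutable-start state machine with an explicit index of boundary
-- events paired with their successor (alternative decomposition, same O(n) cost).


-- ===== PORT A =====
-- literal port of A: fold over enumerate(bio) carrying (positions, start)
def bio_2_position (bio : List Int) : List (List Int) :=
  (((PySem.List.enumerate bio).foldl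
    (fun (st : List (List Int) × Option Int) (p : Int × Int) =>
      if p.2 == 0 then
        match st.2 with
        | some s => (st.1 ++ [[s, p.1]], none)
        | none   => (st.1, none)
      else if p.2 == 1 then
        match st.2 with
        | some s => (st.1 ++ [[s, p.1]], some p.1)
        | none   => (st.1, some p.1)
      else st)
    ([], none))).1

-- ===== PORT B =====
-- port of Source B: boundary events, then pair each event with its successor
def bio_2_position_alt (bio : List Int) : List (List Int) :=
  let bs := (PySem.List.enumerate bio).filter (fun p => p.2 == 0 || p.2 == 1)
  (bs.zip bs.tail).filterMap (fun q => if q.1.2 == 1 then some [q.1.1, q.2.1] else none)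

-- ===== PRECONDITION & SPEC =====
def Spec_bio_2_position (bio : List Int) (out : List (List Int)) : Prop := out = bio_2_position_alt bio
instance (bio : List Int) (out : List (List Int)) : Decidable (Spec_bio_2_position bio out) := by unfold Spec_bio_2_position; infer_instance

-- ===== CLAIM (what is proved, stated in full; the proofs are below) =====
def Claim_equal_bio_2_position : Prop := ∀ (bio : List Int), Dom_bio_2_position bio → Spec_bio_2_position bio (bio_2_position bio)

-- ===== LEMMAS AND PROOFS =====

-- B's pairing pass, as a standalone function for the invariant
def pvPairs (bs : List (Int × Int)) : List (List Int) :=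
  (bs.zip bs.tail).filterMap (fun q => if q.1.2 == 1 then some [q.1.1, q.2.1] else none)

-- prepend an open span (if any) as a synthetic 1-event
def pvPrepend (start : Option Int) (bs : List (Int × Int)) : List (Int × Int) :=
  match start with
  | none => bs
  | some s => (s, 1) :: bs

theorem pvPairs_cons (x y : Int × Int) (t : List (Int × Int)) :
    pvPairs (x :: y :: t) =
      (if x.2 == 1 then [[x.1, y.1]] else []) ++ pvPairs (y :: t) := by
  simp [pvPairs, List.filterMap_cons]
  split <;> simp_all

theorem pvPairs_zero_cons (i : Int) (bs : List (Int × Int)) :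
    pvPairs ((i, 0) :: bs) = pvPairs bs := by
  cases bs with
  | nil => simp [pvPairs]
  | cons y t => rw [pvPairs_cons]; simp

-- loop invariant for A's fold over an arbitrary event list
theorem pvLoop_inv (ev : List (Int × Int)) :
    ∀ (acc : List (List Int)) (start : Option Int),
    (ev.foldl
      (fun (st : List (List Int) × Option Int) (p : Int × Int) =>
        if p.2 == 0 then
          match st.2 with
          | some s => (st.1 ++ [[s, p.1]], none)
          | none   => (st.1, none)
        else if p.2 == 1 then
          match st.2 with
          | some s => (st.1 ++ [[s, p.1]], some p.1)
          | none   => (st.1, some p.1)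
        else st)
      (acc, start)).1
    = acc ++ pvPairs (pvPrepend start (ev.filter (fun p => p.2 == 0 || p.2 == 1))) := by
  induction ev with
  | nil =>
    intro acc start
    cases start <;> simp [pvPrepend, pvPairs]
  | cons p t ih =>
    intro acc start
    obtain ⟨i, l⟩ := p
    by_cases h0 : l = 0
    · subst h0
      cases start with
      | none =>
        simp only [List.foldl_cons, List.filter_cons]
        simpa [pvPrepend, pvPairs_zero_cons] using ih acc none
      | some s =>
        simp only [List.foldl_cons, List.filter_cons]
        have := ih (acc ++ [[s, i]]) none
        simp [pvPrepend] at this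
        simp [pvPrepend, this, pvPairs_cons, pvPairs_zero_cons]
    · by_cases h1 : l = 1
      · subst h1
        cases start with
        | none =>
          simp only [List.foldl_cons, List.filter_cons]
          have := ih acc (some i)
          simp [pvPrepend] at this
          simp [pvPrepend, this]
        | some s =>
          simp only [List.foldl_cons, List.filter_cons]
          have := ih (acc ++ [[s, i]]) (some i)
          simp [pvPrepend] at this
          simp [pvPrepend, this, pvPairs_cons]
      · have e0 : (l == 0) = false := by simp [h0]
        have e1 : (l == 1) = false := by simp [h1]
        simp only [List.foldl_cons, List.filter_cons, e0, e1, Bool.false_eq_true,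
          if_false, Bool.or_self]
        exact ih acc start

-- ===== VERDICT (by name: the statement is the Claim_ definition above) =====
theorem bio_2_position_spec : Claim_equal_bio_2_position := by
  intro bio _
  unfold Spec_bio_2_position bio_2_position bio_2_position_alt
  simpa [pvPrepend, pvPairs] using
    pvLoop_inv (PySem.List.enumerate bio) [] none
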